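-- pv_equiv track=rewrite | github.com/Gikon3/cppLsnParser | DataAnalysis.py | mem_process
-- ===== SOURCE A (Python) =====
-- def mem_process(val: int, pattern: int):
--     xor = ""
--     count = 0
--     for i in range(32):
--         if val & 1 == pattern & 1:
--             xor += '.'
--         elif val & 1 == 0 and pattern & 1 == 1:
--             xor += '-'
--             count += 1
--         elif val & 1 == 1 and pattern & 1 == 0:
--             xor += '+'
--             count += 1
--         else:
--             xor += 'X'
--         val = val >> 1
--         pattern = pattern >> 1
--     return count, xor[::-1]
-- ===== SOURCE B (Python) =====
-- def mem_process(val: int, pattern: int):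
--     a = format(val % 0x100000000, '032b')
--     b = format(pattern % 0x100000000, '032b')
--     count = 0
--     out = []
--     for x, y in zip(a, b):
--         if x == y:
--             out.append('.')
--         elif x == '0':
--             out.append('-')
--             count += 1
--         else:
--             out.append('+')
--             count += 1
--     return count, ''.join(out)
-- ===== Notes on version B (the rewrite author's own statement) =====
-- stated objective: idiomatic
-- what changed: Replaces A's 32-iteration shift-and-test loop that appends glyphs LSB-first and reverses at the end by masking both values to their low 32 bits once, formatting them to MSB-first 32-char binary strings with format(x, '032b'), and zipping the two strings to emit glyphs directly in output order (no reversal), counting mismatches in the same pass.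
import Mathlib
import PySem

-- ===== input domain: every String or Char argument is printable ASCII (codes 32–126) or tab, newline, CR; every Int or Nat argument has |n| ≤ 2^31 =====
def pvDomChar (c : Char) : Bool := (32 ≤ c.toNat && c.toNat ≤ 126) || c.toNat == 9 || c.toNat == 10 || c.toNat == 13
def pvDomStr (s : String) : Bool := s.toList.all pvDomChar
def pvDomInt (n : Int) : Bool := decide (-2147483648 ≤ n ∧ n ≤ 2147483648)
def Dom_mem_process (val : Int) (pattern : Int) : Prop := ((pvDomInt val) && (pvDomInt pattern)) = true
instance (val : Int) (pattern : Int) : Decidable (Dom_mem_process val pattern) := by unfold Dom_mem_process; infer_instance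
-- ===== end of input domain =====

-- B replaces A's 32-step shift-and-append loop (plus final reversal) by formatting both
-- low-32-bit values to MSB-first binary strings once and zipping them; objective: idiomatic.

-- ===== PORT A =====
-- strings are modeled as Lean char lists during the loop (exact for these ASCII glyphs);
-- Python's 'val & 1' is PySem.Int.band, 'val >> 1' is Lean's '>>>' (Python-exact per PySem).
def pvStepA (st : List Char × Int × Int × Int) (_i : Nat) : List Char × Int × Int × Int :=
  let xor := st.1; let count := st.2.1; let v := st.2.2.1; let p := st.2.2.2
  let xc :=
    if PySem.Int.band v 1 = PySem.Int.band p 1 then (xor ++ ['.'], count)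
    else if PySem.Int.band v 1 = 0 ∧ PySem.Int.band p 1 = 1 then (xor ++ ['-'], count + 1)
    else if PySem.Int.band v 1 = 1 ∧ PySem.Int.band p 1 = 0 then (xor ++ ['+'], count + 1)
    else (xor ++ ['X'], count)
  (xc.1, xc.2, v >>> (1:Nat), p >>> (1:Nat))

def mem_process (val : Int) (pattern : Int) : Int × String :=
  let r := (List.range 32).foldl pvStepA ([], 0, val, pattern)
  (r.2.1, String.mk r.1.reverse)  -- xor[::-1]

-- ===== PORT B =====
-- hand port of format(m, '032b') for 0 ≤ m < 2^32: char j is bit (31-j) of m (MSB first);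
-- '/' and '%' on these nonnegative values with positive divisors are Python-exact.
def pvBin32 (m : Int) : List Char :=
  (List.range 32).map (fun j => if m / 2 ^ (31 - j) % 2 = 1 then '1' else '0')

def pvStepB (st : Int × List Char) (xy : Char × Char) : Int × List Char :=
  if xy.1 = xy.2 then (st.1, st.2 ++ ['.'])
  else if xy.1 = '0' then (st.1 + 1, st.2 ++ ['-'])
  else (st.1 + 1, st.2 ++ ['+'])

def mem_process_alt (val : Int) (pattern : Int) : Int × String :=
  let a := pvBin32 (PySem.Int.mod val 4294967296)
  let b := pvBin32 (PySem.Int.mod pattern 4294967296)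
  let r := (a.zip b).foldl pvStepB (0, [])
  (r.1, String.mk r.2)

-- ===== PRECONDITION & SPEC =====
def Spec_mem_process (val : Int) (pattern : Int) (out : Int × String) : Prop := out = mem_process_alt val pattern
instance (val : Int) (pattern : Int) (out : Int × String) : Decidable (Spec_mem_process val pattern out) := by unfold Spec_mem_process; infer_instance

-- ===== CLAIM (what is proved, stated in full; the proofs are below) =====
def Claim_equal_mem_process : Prop := ∀ (val : Int) (pattern : Int), Dom_mem_process val pattern → Spec_mem_process val pattern (mem_process val pattern)

-- ===== LEMMAS AND PROOFS =====

-- bit i (from the LSB) of v, Python semantics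
def pvBit (v : Int) (i : Nat) : Int := v / 2 ^ i % 2

def pvGlyph (a b : Int) : Char :=
  if a = b then '.' else if a = 0 ∧ b = 1 then '-' else if a = 1 ∧ b = 0 then '+' else 'X'

def pvInd (a b : Int) : Int := if a = b then 0 else 1

lemma pvBit01 (v : Int) (i : Nat) : pvBit v i = 0 ∨ pvBit v i = 1 := by
  unfold pvBit; omega

lemma pvBand1 (v : Int) (i : Nat) : PySem.Int.band (v >>> i) 1 = pvBit v i := by
  rw [PySem.Int.band_one, PySem.Int.mod_eq_emod_of_pos (by norm_num), Int.shiftRight_eq_div_pow]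
  rfl

lemma lemA (n : Nat) (v p : Int) (xs : List Char) (c : Int) :
    (List.range n).foldl pvStepA (xs, c, v, p) =
      (xs ++ (List.range n).map (fun i => pvGlyph (pvBit v i) (pvBit p i)),
       c + ((List.range n).map (fun i => pvInd (pvBit v i) (pvBit p i))).sum,
       v >>> n, p >>> n) := by
  induction n with
  | zero => simp
  | succ n ih =>
    rw [List.range_succ, List.foldl_append, ih]
    have hv : (v >>> n) >>> (1:Nat) = v >>> (n + 1) := (Int.shiftRight_add v n 1).symm
    
    have hp : (p >>> n) >>> (1:Nat) = p >>> (n + 1) := (Int.shiftRight_add p n 1).symm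
    simp only [List.foldl_cons, List.foldl_nil, List.map_append, List.map_cons, List.map_nil,
      List.sum_append, List.sum_cons, List.sum_nil]
    rw [pvStepA, pvBand1, pvBand1, hv, hp]
    rcases pvBit01 v n with h1 | h1 <;> rcases pvBit01 p n with h2 | h2 <;>
      simp [h1, h2, pvGlyph, pvInd] <;> omega

lemma lemB (mv mp : Int) (l : List Nat) (c : Int) (out : List Char) :
    (l.map (fun j => ((if pvBit mv (31 - j) = 1 then '1' else '0'),
                      (if pvBit mp (31 - j) = 1 then '1' else '0')))).foldl pvStepB (c, out) =
      (c + (l.map (fun j => pvInd (pvBit mv (31 - j)) (pvBit mp (31 - j)))).sum,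
       out ++ l.map (fun j => pvGlyph (pvBit mv (31 - j)) (pvBit mp (31 - j)))) := by
  induction l generalizing c out with
  | nil => simp
  | cons j l ih =>
    simp only [List.map_cons, List.foldl_cons, List.sum_cons]
    rw [ih]
    rcases pvBit01 mv (31 - j) with h1 | h1 <;> rcases pvBit01 mp (31 - j) with h2 | h2 <;>
      simp [h1, h2, pvStepB, pvGlyph, pvInd] <;> omega

-- bits below 32 are unchanged by taking the value mod 2^32
lemma pvBit_mod (v : Int) (j : Nat) (hj : j < 32) :
    pvBit (PySem.Int.mod v 4294967296) j = pvBit v j := by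
  rw [PySem.Int.mod_eq_emod_of_pos (by norm_num)]
  unfold pvBit
  have h32 : (4294967296 : Int) = 2 ^ j * 2 ^ (32 - j) := by
    rw [← pow_add, show j + (32 - j) = 32 from by omega]; norm_num
  have hq : v % 4294967296 = v + 2 ^ j * (-(2 ^ (32 - j) * (v / 4294967296))) := by
    rw [Int.emod_def]; rw [h32]; ring
  rw [hq, Int.add_mul_ediv_left v _ (by positivity)]
  have hd : (2 : Int) ^ (32 - j) = 2 * 2 ^ (31 - j) := by
    rw [show 32 - j = (31 - j) + 1 from by omega, pow_succ']
  rw [hd]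
  have : v / 2 ^ j + -(2 * 2 ^ (31 - j) * (v / 4294967296))
       = v / 2 ^ j + 2 * (-(2 ^ (31 - j) * (v / 4294967296))) := by ring
  rw [this, Int.add_mul_emod_self_left]

lemma reverse_map_range {α : Type} (F : Nat → α) (n : Nat) :
    ((List.range n).map F).reverse = (List.range n).map (fun j => F (n - 1 - j)) := by
  apply List.ext_getElem
  · simp
  · intro k h1 h2
    simp only [List.getElem_reverse, List.getElem_map, List.getElem_range,
      List.length_reverse, List.length_map, List.length_range] at h1 h2 ⊢

-- ===== VERDICT (by name: the statement is the Claim_ definition above) =====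
theorem mem_process_spec : Claim_equal_mem_process := by
  unfold Claim_equal_mem_process
  intro val pattern _
  unfold Spec_mem_process mem_process mem_process_alt pvBin32
  rw [lemA]
  have hzip := @List.zip_map' Nat Char Char
    (fun j => if PySem.Int.mod val 4294967296 / 2 ^ (31 - j) % 2 = 1 then '1' else '0')
    (fun j => if PySem.Int.mod pattern 4294967296 / 2 ^ (31 - j) % 2 = 1 then '1' else '0')
    (List.range 32)
  simp only [hzip]
  have hmapv : (List.range 32).map
      (fun j => ((if PySem.Int.mod val 4294967296 / 2 ^ (31 - j) % 2 = 1 then '1' else '0'),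
                 (if PySem.Int.mod pattern 4294967296 / 2 ^ (31 - j) % 2 = 1 then '1' else '0'))) =
      (List.range 32).map
      (fun j => ((if pvBit val (31 - j) = 1 then '1' else '0'),
                 (if pvBit pattern (31 - j) = 1 then '1' else '0'))) := by
    apply List.map_congr_left
    intro j hj
    have hj' : 31 - j < 32 := by omega
    rw [show PySem.Int.mod val 4294967296 / 2 ^ (31 - j) % 2 = pvBit (PySem.Int.mod val 4294967296) (31 - j) from rfl,
        show PySem.Int.mod pattern 4294967296 / 2 ^ (31 - j) % 2 = pvBit (PySem.Int.mod pattern 4294967296) (31 - j) from rfl,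
        pvBit_mod _ _ hj', pvBit_mod _ _ hj']
  rw [hmapv, lemB]
  simp only [List.nil_append, zero_add]
  rw [Prod.mk.injEq]
  refine ⟨?_, ?_⟩
  · conv_lhs => rw [← List.sum_reverse]
    rw [reverse_map_range]
  · congr 1
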